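-- pv_equiv track=rewrite | github.com/minimimin/come_on | 프로그래머스/0/120853. 컨트롤 제트/컨트롤 제트.py | solution
-- ===== SOURCE A (Python) =====
-- def solution(s):
--     memo = []
--     answer = 0
--     comm = s.split()
--     for num in comm:
--         if num == 'Z':
--             answer -= memo.pop()
--         else:
--             answer += int(num)
--             memo.append(int(num))
--     return answer
-- ===== SOURCE B (Python) =====
-- def solution(s):
--     skip = 0
--     total = 0
--     for num in reversed(s.split()):
--         if num == 'Z':
--             skip += 1
--         elif skip:
--             skip -= 1
--         else:
--             total += int(num)
--     return total
-- ===== Notes on version B (the rewrite author's own statement) =====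
-- stated objective: alternative
-- what changed: Replaces A's forward pass maintaining a stack of numbers (push on number, pop-and-subtract on 'Z') by a right-to-left scan keeping only a pending-Z skip counter and a total: each 'Z' increments the counter, a number is either consumed by a pending 'Z' or added to the total; no list is kept, O(1) extra space.
-- outside the precondition, e.g. on solution('Z'): A raises IndexError, B returns 0
import Mathlib
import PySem

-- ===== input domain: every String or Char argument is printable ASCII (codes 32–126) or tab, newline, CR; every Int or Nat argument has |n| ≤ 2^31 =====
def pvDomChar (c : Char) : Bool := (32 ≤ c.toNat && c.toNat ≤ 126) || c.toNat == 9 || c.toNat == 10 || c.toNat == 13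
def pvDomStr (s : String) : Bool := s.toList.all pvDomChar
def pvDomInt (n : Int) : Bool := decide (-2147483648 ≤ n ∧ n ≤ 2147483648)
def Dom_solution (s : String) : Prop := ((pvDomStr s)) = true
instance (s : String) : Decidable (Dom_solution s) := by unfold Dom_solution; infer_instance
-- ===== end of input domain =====

-- B replaces A's forward stack pass by a right-to-left scan with only a pending-Z skip counter and a running total (no list kept).

-- ===== PORT A =====
-- one step of A's loop over state (memo, answer); the none branch of pop is unreachable under Pre_
def solStepA (st : List Int × Int) (num : String) : List Int × Int :=
  if num = "Z" then
    match PySem.List.pop? st.1 (-1) with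
    | some (v, rest) => (rest, st.2 - v)
    | none => st
  else
    let n := (PySem.Int.ofStr? num).getD 0   -- getD never used under Pre_ (int(num) succeeds)
    (st.1 ++ [n], st.2 + n)

def solution (s : String) : Int :=
  ((PySem.Str.split₀ s).foldl solStepA ([], 0)).2

-- ===== PORT B =====
-- one step of B's reversed loop over state (skip, total)
def solSkipStep (st : Nat × Int) (num : String) : Nat × Int :=
  if num = "Z" then (st.1 + 1, st.2)
  else if st.1 > 0 then (st.1 - 1, st.2)
  else (st.1, st.2 + (PySem.Int.ofStr? num).getD 0)   -- getD never used under Pre_ (int(num) succeeds)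

def solution_alt (s : String) : Int :=
  (((PySem.Str.split₀ s).reverse).foldl solSkipStep (0, 0)).2

-- ===== PRECONDITION & SPEC =====
-- Pre_ excludes exactly the inputs where the Python A raises: a token that is neither 'Z' nor a
-- valid int literal (ValueError), or a 'Z' arriving with an empty stack (IndexError on pop).
def Pre_solution (s : String) : Prop :=
  (∀ t ∈ PySem.Str.split₀ s, t ≠ "Z" → (PySem.Int.ofStr? t).isSome = true) ∧
  (∀ i, i < (PySem.Str.split₀ s).length → (PySem.Str.split₀ s).getD i "" = "Z" →
      2 * (((PySem.Str.split₀ s).take i).count "Z") < i)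
instance (s : String) : Decidable (Pre_solution s) := by unfold Pre_solution; infer_instance

def pvWitness_solution : String := "1 2 Z 3"

def Spec_solution (s : String) (out : Int) : Prop := out = solution_alt s
instance (s : String) (out : Int) : Decidable (Spec_solution s out) := by unfold Spec_solution; infer_instance

-- ===== CLAIM (what is proved, stated in full; the proofs are below) =====
def Claim_equal_solution : Prop := ∀ (s : String), Dom_solution s → Pre_solution s → Spec_solution s (solution s)

-- ===== LEMMAS AND PROOFS =====

-- proof-only helper: the stack of numbers that survive the token list (push number, pop on 'Z')
def stackStep (stack : List Int) (num : String) : List Int :=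
  if num = "Z" then stack.dropLast
  else stack ++ [(PySem.Int.ofStr? num).getD 0]

-- invariant for A: its state is (stack, stack.sum) where stack is the surviving-number stack
theorem foldl_stepA_eq (toks : List String) (stack : List Int) :
    toks.foldl solStepA (stack, stack.sum) =
      (toks.foldl stackStep stack, (toks.foldl stackStep stack).sum) := by
  induction toks generalizing stack with
  | nil => rfl
  | cons t ts ih =>
    simp only [List.foldl_cons]
    have hstep : solStepA (stack, stack.sum) t =
        (stackStep stack t, (stackStep stack t).sum) := by
      by_cases hz : t = "Z"
      · cases stack using List.reverseRecOn with
        | nil => simp [solStepA, stackStep, hz, PySem.List.pop?]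
        | append_singleton xs x =>
          simp [solStepA, stackStep, hz, PySem.List.pop?_last]
      · simp [solStepA, stackStep, hz]
    rw [hstep, ih]

-- invariant for B: the right-to-left fold with k pending Z's sums the surviving stack minus its last k entries
theorem foldr_skip (ts : List String) : ∀ (k : Nat) (T : Int),
    (ts.foldr (fun x y => solSkipStep y x) (k, T)).2
      = T + ((ts.foldl stackStep []).take ((ts.foldl stackStep []).length - k)).sum := by
  induction ts using List.reverseRecOn with
  | nil => simp
  | append_singleton ts t ih =>
    intro k T
    rw [List.foldr_append, List.foldl_append]
    simp only [List.foldr_cons, List.foldr_nil, List.foldl_cons, List.foldl_nil]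
    set S := ts.foldl stackStep [] with hS
    by_cases hz : t = "Z"
    · have : solSkipStep (k, T) t = (k + 1, T) := by simp [solSkipStep, hz]
      rw [this, ih]
      have harg : (S.dropLast).take (S.dropLast.length - k) = S.take (S.length - (k + 1)) := by
        rw [List.dropLast_eq_take, List.take_take]
        congr 1
        simp [List.length_take]
        omega
      rw [show stackStep S t = S.dropLast from by simp [stackStep, hz], harg]
    · by_cases hk : k > 0
      · have : solSkipStep (k, T) t = (k - 1, T) := by simp [solSkipStep, hz, hk]
        rw [this, ih]
        have harg : (S ++ [(PySem.Int.ofStr? t).getD 0]).take ((S ++ [(PySem.Int.ofStr? t).getD 0]).length - k)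
            = S.take (S.length - (k - 1)) := by
          rw [List.take_append_of_le_length (by simp; omega)]
          congr 1
          simp
          omega
        rw [show stackStep S t = S ++ [(PySem.Int.ofStr? t).getD 0] from by simp [stackStep, hz], harg]
      · have hk0 : k = 0 := by omega
        subst hk0
        have : solSkipStep (0, T) t = (0, T + (PySem.Int.ofStr? t).getD 0) := by
          simp [solSkipStep, hz]
        rw [this, ih]
        simp [stackStep, hz, List.take_of_length_le]
        ring

-- ===== VERDICT (by name: the statement is the Claim_ definition above) =====
theorem solution_spec : Claim_equal_solution := by
  intro s _ _
  show _ = _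
  unfold solution solution_alt
  rw [show ((0 : Int) = ([] : List Int).sum) from rfl,
      foldl_stepA_eq, List.foldl_reverse, foldr_skip]
  simp
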